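-- pv_equiv track=rewrite | github.com/MarcYin/spectral_library | src/spectral_library/normalize.py | _strip_tabular_comments
-- ===== SOURCE A (Python) =====
-- from typing import Iterable, Iterator, Sequence
--
-- def _strip_tabular_comments(lines: Sequence[str]) -> list[str]:
--     cleaned: list[str] = []
--     in_block_comment = False
--     for raw_line in lines:
--         line = raw_line.rstrip("\n")
--         stripped = line.strip()
--         if in_block_comment:
--             if "*/" in stripped:
--                 in_block_comment = False
--             continue
--         if stripped.startswith("/*"):
--             if "*/" not in stripped:
--                 in_block_comment = True
--             continue
--         if stripped.startswith("#"):
--             continue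
--         cleaned.append(line)
--     return cleaned
-- ===== SOURCE B (Python) =====
-- def _strip_tabular_comments(lines):
--     cleaned = []
--     i = 0
--     n = len(lines)
--     while i < n:
--         line = lines[i].rstrip("\n")
--         stripped = line.strip()
--         i += 1
--         if stripped.startswith("/*"):
--             if "*/" not in stripped:
--                 # consume the block inline: skip until (and including) the closing line
--                 while i < n and "*/" not in lines[i].rstrip("\n").strip():
--                     i += 1
--                 i += 1
--             continue
--         if stripped.startswith("#"):
--             continue
--         cleaned.append(line)
--     return cleaned
-- ===== Notes on version B (the rewrite author's own statement) =====
-- stated objective: alternative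
-- what changed: Replaced the flag-carrying for-loop with an index-based while loop that consumes a /* ... */ block inline via a nested skip loop, eliminating the in_block_comment state.
import Mathlib
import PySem

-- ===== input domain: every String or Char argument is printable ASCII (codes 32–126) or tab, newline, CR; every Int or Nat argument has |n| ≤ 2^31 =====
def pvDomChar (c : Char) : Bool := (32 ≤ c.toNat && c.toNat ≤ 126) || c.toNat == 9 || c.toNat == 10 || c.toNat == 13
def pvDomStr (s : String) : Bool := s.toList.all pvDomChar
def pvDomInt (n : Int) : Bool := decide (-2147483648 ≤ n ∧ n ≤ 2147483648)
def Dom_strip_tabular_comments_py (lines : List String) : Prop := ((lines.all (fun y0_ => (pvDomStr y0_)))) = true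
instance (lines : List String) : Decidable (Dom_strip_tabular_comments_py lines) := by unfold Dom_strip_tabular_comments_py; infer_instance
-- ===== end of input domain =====

-- B replaces A's flag-carrying for-loop by an index-style loop that consumes a /* … */ block
-- inline with a nested skip loop (objective: alternative decomposition, same cost).

-- s.rstrip("\n") — ported by hand (PySem has no chars-argument rstrip); exact: drops exactly
-- the trailing '\n' characters.
def pvRstripNl (s : String) : String :=
  String.ofList ((s.toList.reverse.dropWhile (fun c => c == '\n')).reverse)

-- ===== PORT A =====
def strip_tabular_comments_py (lines : List String) : List String :=
  (lines.foldl
    (fun (st : List String × Bool) raw_line =>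
      let line := pvRstripNl raw_line
      let stripped := PySem.Str.strip line
      if st.2 then
        if PySem.Str.isIn "*/" stripped then (st.1, false) else st
      else if PySem.Str.startswith stripped "/*" then
        if !(PySem.Str.isIn "*/" stripped) then (st.1, true) else st
      else if PySem.Str.startswith stripped "#" then st
      else (st.1 ++ [line], st.2))
    ([], false)).1

-- ===== PORT B =====
-- inner `while`: drop lines until one whose stripped form contains "*/" (drop it too)
def pvSkipBlock : List String → List String
  | [] => []
  | raw :: rest =>
    if PySem.Str.isIn "*/" (PySem.Str.strip (pvRstripNl raw)) then rest
    else pvSkipBlock rest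

theorem pvSkipBlock_length_le (l : List String) : (pvSkipBlock l).length ≤ l.length := by
  induction l with
  | nil => simp [pvSkipBlock]
  | cons a t ih =>
    simp only [pvSkipBlock]
    split
    · simp
    · simp only [List.length_cons]
      omega

def strip_tabular_comments_py_alt (lines : List String) : List String :=
  match lines with
  | [] => []
  | raw :: rest =>
    let line := pvRstripNl raw
    let stripped := PySem.Str.strip line
    if PySem.Str.startswith stripped "/*" then
      if !(PySem.Str.isIn "*/" stripped) then
        strip_tabular_comments_py_alt (pvSkipBlock rest)
      else strip_tabular_comments_py_alt rest
    else if PySem.Str.startswith stripped "#" then strip_tabular_comments_py_alt rest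
    else line :: strip_tabular_comments_py_alt rest
termination_by lines.length
decreasing_by
  · exact Nat.lt_succ_of_le (pvSkipBlock_length_le rest)
  · simp
  · simp
  · simp

-- ===== PRECONDITION & SPEC =====
def Spec_strip_tabular_comments_py (lines : List String) (out : List String) : Prop := out = strip_tabular_comments_py_alt lines
instance (lines : List String) (out : List String) : Decidable (Spec_strip_tabular_comments_py lines out) := by unfold Spec_strip_tabular_comments_py; infer_instance

-- ===== CLAIM (what is proved, stated in full; the proofs are below) =====
def Claim_equal_strip_tabular_comments_py : Prop := ∀ (lines : List String), Dom_strip_tabular_comments_py lines → Spec_strip_tabular_comments_py lines (strip_tabular_comments_py lines)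

-- ===== LEMMAS AND PROOFS =====

-- A's loop body, named for the proofs
def pvStepA (st : List String × Bool) (raw_line : String) : List String × Bool :=
  let line := pvRstripNl raw_line
  let stripped := PySem.Str.strip line
  if st.2 then
    if PySem.Str.isIn "*/" stripped then (st.1, false) else st
  else if PySem.Str.startswith stripped "/*" then
    if !(PySem.Str.isIn "*/" stripped) then (st.1, true) else st
  else if PySem.Str.startswith stripped "#" then st
  else (st.1 ++ [line], st.2)

-- with the flag set, A's fold just runs pvSkipBlock and resumes with the flag cleared
theorem foldA_flag_true (l : List String) (acc : List String) :
    (l.foldl pvStepA (acc, true)).1 = ((pvSkipBlock l).foldl pvStepA (acc, false)).1 := by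
  induction l generalizing acc with
  | nil => simp [pvSkipBlock]
  | cons a t ih =>
    by_cases hin : PySem.Chars.isIn ['*', '/'] (PySem.Chars.strip (pvRstripNl a).toList) = true
    · simp [pvStepA, pvSkipBlock, hin]
    · simp only [List.foldl_cons]
      have hstep : pvStepA (acc, true) a = (acc, true) := by
        simp [pvStepA, hin]
      rw [hstep]
      conv_rhs => rw [pvSkipBlock]
      rw [if_neg (by simp [hin])]
      exact ih acc

-- main invariant: with the flag clear, A's fold appends exactly B's output
theorem foldA_flag_false (n : Nat) :
    ∀ (l : List String), l.length ≤ n → ∀ (acc : List String),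
      (l.foldl pvStepA (acc, false)).1 = acc ++ strip_tabular_comments_py_alt l := by
  induction n with
  | zero =>
    intro l hl acc
    have hnil : l = [] := List.eq_nil_of_length_eq_zero (Nat.le_zero.mp hl)
    subst hnil
    simp [strip_tabular_comments_py_alt]
  | succ n ih =>
    intro l hl acc
    match l with
    | [] => simp [strip_tabular_comments_py_alt]
    | raw :: rest =>
      simp only [List.length_cons, Nat.succ_le_succ_iff] at hl
      rw [List.foldl_cons, strip_tabular_comments_py_alt]
      by_cases hc : PySem.Chars.startswith (PySem.Chars.strip (pvRstripNl raw).toList) ['/', '*'] = true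
      · by_cases hin : PySem.Chars.isIn ['*', '/'] (PySem.Chars.strip (pvRstripNl raw).toList) = true
        · have hstep : pvStepA (acc, false) raw = (acc, false) := by
            simp [pvStepA, hc, hin]
          rw [hstep, ih _ hl acc]
          simp [hc, hin]
        · have hstep : pvStepA (acc, false) raw = (acc, true) := by
            simp [pvStepA, hc, hin]
          rw [hstep, foldA_flag_true, ih _ (le_trans (pvSkipBlock_length_le rest) hl) acc]
          simp [hc, hin]
      · by_cases hh : PySem.Chars.startswith (PySem.Chars.strip (pvRstripNl raw).toList) ['#'] = true
        · have hstep : pvStepA (acc, false) raw = (acc, false) := by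
            simp [pvStepA, hc, hh]
          rw [hstep, ih _ hl acc]
          simp [hc, hh]
        · have hstep : pvStepA (acc, false) raw = (acc ++ [pvRstripNl raw], false) := by
            simp [pvStepA, hc, hh]
          rw [hstep, ih _ hl (acc ++ [pvRstripNl raw])]
          simp [hc, hh]

-- ===== VERDICT (by name: the statement is the Claim_ definition above) =====
theorem strip_tabular_comments_py_spec : Claim_equal_strip_tabular_comments_py := by
  intro lines _
  show (lines.foldl pvStepA ([], false)).1 = strip_tabular_comments_py_alt lines
  simpa using foldA_flag_false lines.length lines le_rfl []
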